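-- pv_equiv track=rewrite | github.com/jon13doe/Learn_python | LeetCode/2379.py | minimumRecolors
-- ===== SOURCE A (Python) =====
-- def minimumRecolors(blocks: str, k: int) -> int:
--     string = blocks[:k]
--     res = string.count('W')
--     tres = res
--
--     for i in range(k, len(blocks)):
--         if string[0] == 'W':
--             tres -= 1
--         if blocks[i] == 'W':
--             tres += 1
--         if tres < res:
--             res = tres
--         string = string[1:] + blocks[i]
--     return res
-- ===== SOURCE B (Python) =====
-- def minimumRecolors(blocks: str, k: int) -> int:
--     # Prefix-sum approach: one pass builds cumulative white counts, then the
--     # answer is the minimum difference prefix[i+k]-prefix[i] over all windows.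
--     n = len(blocks)
--     prefix = [0]
--     c = 0
--     for ch in blocks:
--         if ch == 'W':
--             c += 1
--         prefix.append(c)
--     if k >= n:
--         return prefix[n]
--     return min(prefix[i + k] - prefix[i] for i in range(n - k + 1))
-- ===== Notes on version B (the rewrite author's own statement) =====
-- stated objective: faster
-- what changed: B replaces A's sliding window that rebuilds the window substring each step with a two-stage prefix-sum method: one pass builds cumulative white counts, then the answer is the minimum difference prefix[i+k]-prefix[i], turning O(n*k) into O(n).
-- outside the precondition, e.g. on minimumRecolors('BWWB', -1): A returns 1, B raises IndexError
import Mathlib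
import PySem

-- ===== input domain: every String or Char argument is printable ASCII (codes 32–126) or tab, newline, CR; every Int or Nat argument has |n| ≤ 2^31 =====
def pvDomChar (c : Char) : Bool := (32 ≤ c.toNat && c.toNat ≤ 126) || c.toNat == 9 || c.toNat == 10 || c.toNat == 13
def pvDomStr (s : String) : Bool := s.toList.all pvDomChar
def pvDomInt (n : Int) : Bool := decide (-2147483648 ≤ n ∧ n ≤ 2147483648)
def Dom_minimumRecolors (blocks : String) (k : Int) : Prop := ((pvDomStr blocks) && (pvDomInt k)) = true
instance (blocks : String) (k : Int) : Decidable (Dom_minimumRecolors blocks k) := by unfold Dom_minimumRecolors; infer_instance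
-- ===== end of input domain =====

-- B replaces A's per-step window-substring rebuild with prefix sums of white counts
-- and a minimum over prefix differences (same return value on Pre_).

-- ===== PORT A =====
-- loop body of A: string[0]/blocks[i] raise IndexError where pyGet? is none; Pre_ excludes
-- those inputs, so the .getD defaults are unreachable on the claimed domain
def pvStepA (bs : List Char) (st : List Char × Int × Int) (i : Int) : List Char × Int × Int :=
  let string := st.1
  let tres := st.2.1
  let res := st.2.2
  let tres := if (PySem.List.pyGet? string 0).getD ' ' == 'W' then tres - 1 else tres
  let tres := if (PySem.List.pyGet? bs i).getD ' ' == 'W' then tres + 1 else tres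
  let res := if tres < res then tres else res
  (PySem.List.slice string (some 1) none ++ [(PySem.List.pyGet? bs i).getD ' '], tres, res)

def minimumRecolors (blocks : String) (k : Int) : Int :=
  let bs := blocks.toList
  let string := PySem.List.slice bs none (some k)           -- blocks[:k]
  let res : Int := (PySem.Chars.count string ['W'] : Int)   -- string.count('W')
  let tres := res
  ((PySem.List.pyRange k (bs.length : Int)).foldl (pvStepA bs) (string, tres, res)).2.2

-- ===== PORT B =====
-- loop body of B's first pass: running white count, appended to the prefix list
def pvStepP (st : Int × List Int) (ch : Char) : Int × List Int :=
  let c := if ch == 'W' then st.1 + 1 else st.1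
  (c, st.2 ++ [c])

def minimumRecolors_alt (blocks : String) (k : Int) : Int :=
  let bs := blocks.toList
  let n : Int := (bs.length : Int)
  let pre := (bs.foldl pvStepP ((0 : Int), [(0 : Int)])).2   -- cumulative white counts
  if k ≥ n then (PySem.List.pyGet? pre n).getD 0             -- index in range: pre has n+1 entries
  else
    -- min over all windows of prefix[i+k]-prefix[i]; the list is nonempty (k < n), so
    -- Python's min returns and the .getD default is unreachable on the claimed domain
    (PySem.List.min?
      ((PySem.List.pyRange 0 (n - k + 1)).map
        (fun i => (PySem.List.pyGet? pre (i + k)).getD 0 - (PySem.List.pyGet? pre i).getD 0))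
      (fun x => x)).getD 0

-- ===== PRECONDITION & SPEC =====
-- Pre_ keeps the problem's natural domain (a window length k ≥ 1, plus the trivial empty-string
-- k = 0 case): for other k ≤ 0 A raises IndexError on string[0] of an empty window, or — when
-- 1 - len(blocks) ≤ k ≤ -1 — returns a value produced by Python's negative-slice accident
-- blocks[:k] that has no k-window meaning (and on which B raises IndexError).
def Pre_minimumRecolors (blocks : String) (k : Int) : Prop := 1 ≤ k ∨ (k = 0 ∧ blocks = "")
instance (blocks : String) (k : Int) : Decidable (Pre_minimumRecolors blocks k) := by unfold Pre_minimumRecolors; infer_instance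
def pvWitness_minimumRecolors : String × Int := ("BWWB", 2)

def Spec_minimumRecolors (blocks : String) (k : Int) (out : Int) : Prop := out = minimumRecolors_alt blocks k
instance (blocks : String) (k : Int) (out : Int) : Decidable (Spec_minimumRecolors blocks k out) := by unfold Spec_minimumRecolors; infer_instance

-- ===== CLAIM (what is proved, stated in full; the proofs are below) =====
def Claim_equal_minimumRecolors : Prop := ∀ (blocks : String) (k : Int), Dom_minimumRecolors blocks k → Pre_minimumRecolors blocks k → Spec_minimumRecolors blocks k (minimumRecolors blocks k)

-- ===== LEMMAS AND PROOFS =====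

-- the white count of the window of length k starting at position a
def pvWc (bs : List Char) (k a : Int) : Int := (((bs.drop a.toNat).take k.toNat).count 'W' : Int)

-- str.count with a single-character needle is the character count
theorem pvGoSingle (c : Char) (fuel : ℕ) : ∀ (s : List Char) (acc : ℕ), s.length ≤ fuel →
    PySem.Chars.count.go [c] fuel s acc = acc + s.count c := by
  induction fuel with
  | zero => intro s acc h; rw [Nat.le_zero, List.length_eq_zero_iff] at h; subst h
            simp [PySem.Chars.count.go]
  | succ f ih =>
    intro s acc h
    cases s with
    | nil => simp [PySem.Chars.count.go]
    | cons x t =>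
      simp only [PySem.Chars.count.go, List.isPrefixOf]
      simp only [List.length_cons, Nat.add_le_add_iff_right] at h
      by_cases hx : c = x
      · subst hx
        simp only [BEq.rfl, Bool.and_self, if_pos, List.length_cons, List.length_nil,
          Nat.zero_add, List.drop_succ_cons, List.drop_zero]
        rw [ih t (acc+1) h, List.count_cons_self]; omega
      · simp only [List.count_cons, beq_iff_eq, hx, Bool.and_true, Ne.symm hx, if_false]
        rw [ih t acc h]
        simp

theorem pvCountSingle (c : Char) (s : List Char) : PySem.Chars.count s [c] = s.count c := by
  simp [PySem.Chars.count, pvGoSingle c s.length s 0 le_rfl]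

-- B's first pass: the prefix list is exactly the cumulative white counts
theorem pvPrefixFold : ∀ (bs : List Char) (c0 : Int) (acc : List Int),
    bs.foldl pvStepP (c0, acc) =
      (c0 + (bs.count 'W' : Int),
       acc ++ (List.range bs.length).map (fun t => c0 + ((bs.take (t+1)).count 'W' : Int))) := by
  intro bs
  induction bs with
  | nil => intro c0 acc; simp
  | cons x t ih =>
    intro c0 acc
    simp only [List.foldl_cons]
    have hc : pvStepP (c0, acc) x =
        (c0 + ((if x = 'W' then 1 else 0 : ℕ) : Int),
         acc ++ [c0 + ((if x = 'W' then 1 else 0 : ℕ) : Int)]) := by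
      simp only [pvStepP]
      by_cases hx : x = 'W' <;> simp [hx]
    rw [hc, ih]
    simp only [Prod.mk.injEq]
    refine ⟨?_, ?_⟩
    · by_cases hx : x = 'W' <;> simp [hx, List.count_cons] <;> push_cast <;> ring
    · simp only [List.length_cons]
      rw [List.range_succ_eq_map, List.map_cons, List.map_map]
      simp only [List.take_succ_cons, List.take_zero, List.count_cons, List.count_nil,
        Function.comp]
      rw [List.append_assoc]
      congr 1
      by_cases hx : x = 'W' <;> simp [hx] <;> intro a _ <;> push_cast <;> ring

theorem pvPreChar (bs : List Char) :
    (bs.foldl pvStepP ((0 : Int), [(0 : Int)])).2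
      = (List.range (bs.length + 1)).map (fun t => ((bs.take t).count 'W' : Int)) := by
  rw [pvPrefixFold, List.range_succ_eq_map, List.map_cons, List.map_map]
  simp [Function.comp]

theorem pvPreGet (bs : List Char) (i : Int) (h0 : 0 ≤ i) (h1 : i ≤ (bs.length : Int)) :
    PySem.List.pyGet? ((List.range (bs.length + 1)).map (fun t => ((bs.take t).count 'W' : Int))) i
      = some ((bs.take i.toNat).count 'W' : Int) := by
  have hi : i = ((i.toNat : ℕ) : Int) := by omega
  rw [hi, PySem.List.pyGet?_natCast]
  rw [List.getElem?_map, List.getElem?_range (by omega)]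
  rfl

-- prefix difference = white count of the window
theorem pvWinDiff (bs : List Char) (k i : Int) (hk : 0 ≤ k) (hi : 0 ≤ i)
    (hik : i + k ≤ (bs.length : Int)) :
    ((bs.take (i + k).toNat).count 'W' : Int) - ((bs.take i.toNat).count 'W' : Int)
      = pvWc bs k i := by
  have h : (i + k).toNat = i.toNat + k.toNat := by omega
  rw [h, List.take_add, List.count_append]
  unfold pvWc
  push_cast
  ring

-- shifting the index range under a map
theorem pvMapShift (f : Int → Int) (c : Int) (d : ℕ) : ∀ (a b : Int), a + d = b →
    (PySem.List.pyRange a b).map (fun i => f (i + c)) = (PySem.List.pyRange (a + c) (b + c)).map f := by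
  induction d with
  | zero =>
    intro a b h
    have hb : b ≤ a := by omega
    have hb' : b + c ≤ a + c := by omega
    simp [pysem, hb, hb']
  | succ d ih =>
    intro a b h
    rw [PySem.List.pyRange_one_cons (by omega), PySem.List.pyRange_one_cons (show a + c < b + c by omega)]
    simp only [List.map_cons]
    rw [ih (a+1) b (by push_cast at h ⊢; omega)]
    congr 2
    ring

-- A's loop computes the running minimum of the window white counts
theorem pvLoopA (bs : List Char) (k : Int) (hk : 1 ≤ k) (d : ℕ) :
    ∀ (j res : Int), k ≤ j → j + d = (bs.length : Int) →
    ((PySem.List.pyRange j (bs.length : Int)).foldl (pvStepA bs)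
        (PySem.List.slice bs (some (j - k)) (some j), pvWc bs k (j - k), res)).2.2
    = (PySem.List.pyRange j (bs.length : Int)).foldl (fun r i => min r (pvWc bs k (i + 1 - k))) res := by
  induction d with
  | zero =>
    intro j res hj hd
    have : (bs.length : Int) ≤ j := by omega
    simp [pysem, this]
  | succ d ih =>
    intro j res hj hd
    have hjn : j < (bs.length : Int) := by omega
    have hjk0 : 0 ≤ j - k := by omega
    have ha : (j - k).toNat < bs.length := by omega
    have hb : j.toNat < bs.length := by omega
    rw [PySem.List.pyRange_one_cons hjn]
    simp only [List.foldl_cons]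
    have hw : PySem.List.slice bs (some (j - k)) (some j)
        = (bs.drop (j - k).toNat).take k.toNat := by
      rw [PySem.List.slice_toNat bs hjk0 (by omega)]
      congr 1
      omega
    have hgetj : PySem.List.pyGet? bs j = some bs[j.toNat] := by
      have h := PySem.List.pyGet?_natCast bs j.toNat
      rw [show ((j.toNat : ℕ) : Int) = j by omega] at h
      rw [h]; exact List.getElem?_eq_getElem hb
    have hdropjk : bs.drop (j - k).toNat = bs[(j - k).toNat] :: bs.drop ((j - k).toNat + 1) :=
      List.drop_eq_getElem_cons ha
    have hkt : 1 ≤ k.toNat := by omega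
    have hwcons : (bs.drop (j - k).toNat).take k.toNat
        = bs[(j - k).toNat] :: (bs.drop ((j - k).toNat + 1)).take (k.toNat - 1) := by
      cases hk' : k.toNat with
      | zero => omega
      | succ m => rw [hdropjk, List.take_succ_cons]; congr 1 <;> omega
    have hhead : PySem.List.pyGet? (PySem.List.slice bs (some (j - k)) (some j)) 0
        = some bs[(j - k).toNat] := by
      rw [hw, hwcons]
      simp [PySem.List.pyGet?, PySem.List.pyIdx?]
    have hlast : (List.drop ((j - k).toNat + 1) bs)[k.toNat - 1]? = some bs[j.toNat] := by
      rw [List.getElem?_drop, show (j - k).toNat + 1 + (k.toNat - 1) = j.toNat by omega]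
      exact List.getElem?_eq_getElem hb
    have hwnext : (bs.drop (j + 1 - k).toNat).take k.toNat
        = (bs.drop ((j - k).toNat + 1)).take (k.toNat - 1) ++ [bs[j.toNat]] := by
      rw [show (j + 1 - k).toNat = (j - k).toNat + 1 by omega,
        show k.toNat = (k.toNat - 1) + 1 by omega, List.take_add_one, hlast]
      simp
    have hnext : PySem.List.slice (PySem.List.slice bs (some (j - k)) (some j)) (some 1) none
          ++ [bs[j.toNat]]
        = PySem.List.slice bs (some (j + 1 - k)) (some (j + 1)) := by
      rw [PySem.List.slice_from_one, hw, hwcons, List.tail_cons,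
        PySem.List.slice_toNat bs (show (0:Int) ≤ j + 1 - k by omega) (show (0:Int) ≤ j + 1 by omega),
        show (j + 1).toNat - (j + 1 - k).toNat = k.toNat by omega, hwnext]
    -- the count relation between consecutive windows
    have hcount : pvWc bs k (j + 1 - k)
        = pvWc bs k (j - k) - (if bs[(j - k).toNat] = 'W' then 1 else 0)
          + (if bs[j.toNat] = 'W' then 1 else 0) := by
      unfold pvWc
      rw [hwcons, hwnext, List.count_cons, List.count_append]
      by_cases h1 : bs[(j - k).toNat] = 'W' <;> by_cases h2 : bs[j.toNat] = 'W' <;>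
        simp [h1, h2] <;> push_cast <;> ring
    have hstep : pvStepA bs (PySem.List.slice bs (some (j - k)) (some j), pvWc bs k (j - k), res) j
        = (PySem.List.slice bs (some (j + 1 - k)) (some (j + 1)), pvWc bs k (j + 1 - k),
           min res (pvWc bs k (j + 1 - k))) := by
      simp only [pvStepA, hhead, hgetj, Option.getD_some, Prod.mk.injEq]
      refine ⟨hnext, ?_, ?_⟩ <;> rw [hcount] <;>
        by_cases h1 : bs[(j - k).toNat] = 'W' <;> by_cases h2 : bs[j.toNat] = 'W' <;>
        simp [h1, h2] <;> omega
    rw [hstep]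
    have := ih (j + 1) (min res (pvWc bs k (j + 1 - k))) (by omega)
      (by push_cast at hd ⊢; omega)
    rw [show j + 1 - k = (j + 1) - k by ring] at *
    simpa using this

theorem minimumRecolors_spec : Claim_equal_minimumRecolors := by
  intro blocks k _ hpre
  unfold Spec_minimumRecolors
  rcases hpre with hk | ⟨hk0, hb⟩
  · -- 1 ≤ k
    set bs := blocks.toList with hbs
    have hpre' : (bs.foldl pvStepP ((0 : Int), [(0 : Int)])).2
        = (List.range (bs.length + 1)).map (fun t => ((bs.take t).count 'W' : Int)) :=
      pvPreChar bs
    have hA : PySem.List.slice bs none (some k) = bs.take k.toNat :=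
      PySem.List.slice_to bs (by omega)
    by_cases hkn : (bs.length : Int) ≤ k
    · -- k ≥ n: A's loop is empty; both return the white count of the whole string
      have h1 : PySem.List.pyRange k (bs.length : Int) = [] := by simp [pysem, hkn]
      have hAval : minimumRecolors blocks k = ((bs.take k.toNat).count 'W' : Int) := by
        show ((PySem.List.pyRange k (bs.length : Int)).foldl (pvStepA bs) _).2.2 = _
        rw [h1, List.foldl_nil, hA, pvCountSingle]
      have hBval : minimumRecolors_alt blocks k
          = ((bs.take (bs.length : Int).toNat).count 'W' : Int) := by
        show (if k ≥ (bs.length : Int) then _ else _) = _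
        rw [if_pos hkn, hpre', pvPreGet bs (bs.length : Int) (by omega) le_rfl]
        rfl
      rw [hAval, hBval, List.take_of_length_le (by omega),
        List.take_of_length_le (by omega)]
    · -- k < n
      rw [not_le] at hkn
      set n : Int := (bs.length : Int) with hn
      -- A's value
      have hw0 : PySem.List.slice bs (some (k - k)) (some k)
          = PySem.List.slice bs none (some k) := by
        rw [sub_self]; exact PySem.List.slice_zero_start bs (some k)
      have hwc0 : ((bs.take k.toNat).count 'W' : Int) = pvWc bs k 0 := by
        unfold pvWc; simp
      have hAval : minimumRecolors blocks k
          = (PySem.List.pyRange k n).foldl (fun r i => min r (pvWc bs k (i + 1 - k))) (pvWc bs k 0) := by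
        show ((PySem.List.pyRange k n).foldl (pvStepA bs) _).2.2 = _
        rw [hA, pvCountSingle, hwc0]
        have := pvLoopA bs k hk (n - k).toNat k (pvWc bs k 0) le_rfl (by omega)
        rw [hw0, sub_self] at this
        rw [hA] at this
        exact this
      -- B's value
      have hmap : (PySem.List.pyRange 0 (n - k + 1)).map
            (fun i => (PySem.List.pyGet? (bs.foldl pvStepP ((0 : Int), [(0 : Int)])).2 (i + k)).getD 0
              - (PySem.List.pyGet? (bs.foldl pvStepP ((0 : Int), [(0 : Int)])).2 i).getD 0)
          = (PySem.List.pyRange 0 (n - k + 1)).map (pvWc bs k) := by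
        apply List.map_congr_left
        intro i hi
        have hmem := (PySem.List.mem_pyRange_one).mp hi
        have hi0 : 0 ≤ i := hmem.1
        have hi1 : i + k ≤ n := by omega
        rw [hpre', pvPreGet bs (i + k) (by omega) hi1, pvPreGet bs i hi0 (by omega)]
        simp only [Option.getD_some]
        exact pvWinDiff bs k i (by omega) hi0 hi1
      have hcons : PySem.List.pyRange 0 (n - k + 1) = 0 :: PySem.List.pyRange 1 (n - k + 1) := by
        have := PySem.List.pyRange_one_cons (show (0:Int) < n - k + 1 by omega)
        simpa using this
      have hshift : (PySem.List.pyRange k n).map (fun i => pvWc bs k (i + 1 - k))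
          = (PySem.List.pyRange 1 (n - k + 1)).map (pvWc bs k) := by
        have h1 : (fun i => pvWc bs k (i + 1 - k)) = (fun i => pvWc bs k (i + (1 - k))) := by
          funext i; congr 1; ring
        rw [h1, pvMapShift (pvWc bs k) (1 - k) (n - k).toNat k n (by omega),
          show k + (1 - k) = 1 by ring, show n + (1 - k) = n - k + 1 by ring]
      have hBval : minimumRecolors_alt blocks k
          = ((PySem.List.pyRange 1 (n - k + 1)).map (pvWc bs k)).foldl min (pvWc bs k 0) := by
        show (if k ≥ n then _ else _) = _
        rw [if_neg (by omega), hmap, hcons, List.map_cons,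
          PySem.List.min?_id_cons]
        rfl
      rw [hAval, hBval, ← hshift, List.foldl_map]
  · -- k = 0, blocks = ""
    subst hk0 hb; decide
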